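-- pv_equiv track=rewrite | github.com/victoremannuel/arquitetura-computadores | BigEndian.py | gerar_memoria
-- ===== SOURCE A (Python) =====
-- def string_to_binary(s):
--     return ''.join(format(ord(c), '08b') for c in s)
--
-- def int_to_binary(n):
--     return format(n, '064b')
--
-- def gerar_memoria(nome, idade, sexo, endereco_inicial=6):
--     nome_bin = string_to_binary(nome)
--     idade_bin = int_to_binary(idade)
--     sexo_bin = string_to_binary(sexo)
--
--     data = nome_bin + idade_bin + sexo_bin
--     total_bits = len(data)
--
--     memoria = []
--     for i in range(0, total_bits, 64):
--         palavra = data[i:i+64].ljust(64, '0')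
--         memoria.append(palavra)
--
--     matriz = []
--     for i in range(0, len(memoria), 8):
--         linha = memoria[i:i+8]
--         matriz.append(linha)
--
--     return matriz
-- ===== SOURCE B (Python) =====
-- def string_to_binary(s):
--     return ''.join(format(ord(c), '08b') for c in s)
--
-- def int_to_binary(n):
--     return format(n, '064b')
--
-- def gerar_memoria(nome, idade, sexo, endereco_inicial=6):
--     # one streaming pass: feed bits one by one into word/row accumulators,
--     # flushing a word at 64 bits and a row at 8 words; no index slicing at all
--     matriz = []
--     linha = []
--     palavra = []
--
--     def feed(bits):
--         nonlocal linha, palavra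
--         for bit in bits:
--             palavra.append(bit)
--             if len(palavra) == 64:
--                 linha.append(''.join(palavra))
--                 palavra = []
--                 if len(linha) == 8:
--                     matriz.append(linha)
--                     linha = []
--
--     for c in nome:
--         feed(format(ord(c), '08b'))
--     feed(int_to_binary(idade))
--     for c in sexo:
--         feed(format(ord(c), '08b'))
--
--     if palavra:
--         linha.append(''.join(palavra).ljust(64, '0'))
--     if linha:
--         matriz.append(linha)
--     return matriz
-- ===== Notes on version B (the rewrite author's own statement) =====
-- stated objective: alternative
-- what changed: B replaces A's slice-based staged passes (cut data into 64-bit words by index, then group the word list by 8) with a single streaming pass that feeds bits one at a time into word/row accumulators, flushing a word at 64 bits and a row at 8 words, with no index slicing or intermediate flat word list.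
import Mathlib
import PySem

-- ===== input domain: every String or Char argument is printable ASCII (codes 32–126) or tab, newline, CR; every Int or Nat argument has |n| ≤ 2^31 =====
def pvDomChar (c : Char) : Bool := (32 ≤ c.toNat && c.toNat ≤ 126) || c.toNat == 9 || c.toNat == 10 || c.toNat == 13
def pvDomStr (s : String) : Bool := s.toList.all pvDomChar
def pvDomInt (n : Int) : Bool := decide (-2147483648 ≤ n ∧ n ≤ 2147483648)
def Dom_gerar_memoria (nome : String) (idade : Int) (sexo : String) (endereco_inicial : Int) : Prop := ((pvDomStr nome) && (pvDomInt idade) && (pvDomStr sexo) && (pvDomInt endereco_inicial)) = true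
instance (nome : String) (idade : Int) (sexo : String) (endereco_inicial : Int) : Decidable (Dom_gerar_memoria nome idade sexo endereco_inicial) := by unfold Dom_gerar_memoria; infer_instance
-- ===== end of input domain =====

-- ===== PORT A =====
-- B replaces A's two slice-based passes (cut data into 64-bit words by index, then group the
-- word list by 8) with ONE streaming pass feeding bits into word/row accumulators (objective:
-- alternative — same cost, different traversal, no intermediate flat word list).

-- format(ord(c), '08b'): binary of the code point, zero-padded to width 8
def pvFmt8 (c : Char) : List Char :=
  let bits := Nat.toDigits 2 c.toNat
  List.replicate (8 - bits.length) '0' ++ bits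

-- format(n, '064b'): zero-padded to total width 64; a negative n gets a leading '-'
-- that counts towards the width (CPython's rule)
def pvInt64 (n : Int) : List Char :=
  if n < 0 then
    let bits := Nat.toDigits 2 (-n).toNat
    '-' :: (List.replicate (63 - bits.length) '0' ++ bits)
  else
    let bits := Nat.toDigits 2 n.toNat
    List.replicate (64 - bits.length) '0' ++ bits

def pvStringToBinary (s : String) : List Char := (s.toList.map pvFmt8).flatten

-- palavra.ljust(64, '0')
def pvLjust64 (w : List Char) : List Char := w ++ List.replicate (64 - w.length) '0'

def gerar_memoria (nome : String) (idade : Int) (sexo : String) (endereco_inicial : Int) : List (List String) :=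
  let nome_bin := pvStringToBinary nome
  let idade_bin := pvInt64 idade
  let sexo_bin := pvStringToBinary sexo
  let data := nome_bin ++ idade_bin ++ sexo_bin
  let total_bits : Int := data.length
  let memoria : List String :=
    (PySem.List.pyRange 0 total_bits 64).foldl (fun acc i =>
      acc ++ [String.ofList (pvLjust64 (PySem.List.slice data (some i) (some (i + 64))))]) []
  let matriz : List (List String) :=
    (PySem.List.pyRange 0 (memoria.length : Int) 8).foldl (fun acc i =>
      acc ++ [PySem.List.slice memoria (some i) (some (i + 8))]) []
  matriz

-- ===== PORT B =====
-- emit(bit): append the bit to the current word; flush a full word into the row,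
-- and a full row into the matrix (state = (matriz, linha, palavra))
def pvEmit (st : List (List String) × List String × List Char) (bit : Char) :
    List (List String) × List String × List Char :=
  let palavra := st.2.2 ++ [bit]
  if palavra.length = 64 then
    let linha := st.2.1 ++ [String.ofList palavra]
    if linha.length = 8 then (st.1 ++ [linha], [], [])
    else (st.1, linha, [])
  else (st.1, st.2.1, palavra)

-- the two trailing 'if palavra: …' / 'if linha: …' flushes
def pvFinalize (st : List (List String) × List String × List Char) : List (List String) :=
  let linha := if st.2.2.isEmpty then st.2.1 else st.2.1 ++ [String.ofList (pvLjust64 st.2.2)]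
  if linha.isEmpty then st.1 else st.1 ++ [linha]

def gerar_memoria_alt (nome : String) (idade : Int) (sexo : String) (endereco_inicial : Int) : List (List String) :=
  let st0 : List (List String) × List String × List Char := ([], [], [])
  let st1 := nome.toList.foldl (fun st c => (pvFmt8 c).foldl pvEmit st) st0
  let st2 := (pvInt64 idade).foldl pvEmit st1
  let st3 := sexo.toList.foldl (fun st c => (pvFmt8 c).foldl pvEmit st) st2
  pvFinalize st3

-- ===== PRECONDITION & SPEC =====
def Spec_gerar_memoria (nome : String) (idade : Int) (sexo : String) (endereco_inicial : Int) (out : List (List String)) : Prop := out = gerar_memoria_alt nome idade sexo endereco_inicial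
instance (nome : String) (idade : Int) (sexo : String) (endereco_inicial : Int) (out : List (List String)) : Decidable (Spec_gerar_memoria nome idade sexo endereco_inicial out) := by unfold Spec_gerar_memoria; infer_instance

-- ===== CLAIM (what is proved, stated in full; the proofs are below) =====
def Claim_equal_gerar_memoria : Prop := ∀ (nome : String) (idade : Int) (sexo : String) (endereco_inicial : Int), Dom_gerar_memoria nome idade sexo endereco_inicial → Spec_gerar_memoria nome idade sexo endereco_inicial (gerar_memoria nome idade sexo endereco_inicial)

-- ===== LEMMAS AND PROOFS =====

-- chunking a list into pieces of size s (fuel-driven; fuel ≥ length suffices when 0 < s)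
def pvChunksAux {α : Type} (s : Nat) : Nat → List α → List (List α)
  | 0, _ => []
  | _, [] => []
  | n + 1, l => l.take s :: pvChunksAux s n (l.drop s)

def pvChunks {α : Type} (s : Nat) (l : List α) : List (List α) := pvChunksAux s l.length l

theorem pvChunksAux_congr {α : Type} {s : Nat} (hs : 0 < s) :
    ∀ (m n : Nat) (l : List α), l.length ≤ m → l.length ≤ n →
      pvChunksAux s m l = pvChunksAux s n l := by
  intro m
  induction m with
  | zero =>
    intro n l hm _; cases l with
    | nil => cases n <;> rfl
    | cons a t => simp at hm
  | succ m ih =>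
    intro n l hm hn
    cases l with
    | nil => cases n <;> rfl
    | cons a t =>
      cases n with
      | zero => simp at hn
      | succ n =>
        simp only [pvChunksAux]
        congr 1
        apply ih <;>
        · have hd : ((a :: t).drop s).length = t.length + 1 - s := by simp
          simp only [hd]; simp at hm hn; omega

theorem pvChunks_nil {α : Type} (s : Nat) : pvChunks s ([] : List α) = [] := rfl

theorem pvChunks_cons {α : Type} {s : Nat} (hs : 0 < s) (l : List α) (hl : l ≠ []) :
    pvChunks s l = l.take s :: pvChunks s (l.drop s) := by
  cases l with
  | nil => exact absurd rfl hl
  | cons a t =>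
    show pvChunksAux s (a :: t).length (a :: t) = _
    simp only [List.length_cons, pvChunksAux]
    congr 1
    apply pvChunksAux_congr hs
    · have hd : ((a :: t).drop s).length = t.length + 1 - s := by simp
      simp only [hd]; simp; omega
    · rfl

-- a short nonempty list is one chunk
theorem pvChunks_singleton {α : Type} {s : Nat} (hs : 0 < s) (l : List α)
    (h0 : l ≠ []) (hle : l.length ≤ s) : pvChunks s l = [l] := by
  rw [pvChunks_cons hs l h0, List.take_of_length_le hle,
      List.drop_eq_nil_of_le hle, pvChunks_nil]

-- a full-length prefix is the first chunk
theorem pvChunks_append_full {α : Type} {s : Nat} (hs : 0 < s) (l r : List α)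
    (hl : l.length = s) : pvChunks s (l ++ r) = l :: pvChunks s r := by
  have hne : l ++ r ≠ [] := by
    cases l with
    | nil => simp at hl; omega
    | cons a t => simp
  rw [pvChunks_cons hs _ hne]
  congr 1
  · rw [← hl, List.take_left]
  · rw [← hl, List.drop_left]

-- foldl-append = map
theorem pvFoldlAppendMap {α β : Type} (f : α → β) (l : List α) (acc : List β) :
    l.foldl (fun acc x => acc ++ [f x]) acc = acc ++ l.map f := by
  induction l generalizing acc with
  | nil => simp
  | cons a t ih => simp [ih]

-- shift a positive-step range to start at 0
theorem pvRangeShift {β : Type} (a b s : Int) (hs : 0 < s) (f : Int → β) :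
    (PySem.List.pyRange a b s).map f
      = (PySem.List.pyRange 0 (b - a) s).map (fun i => f (a + i)) := by
  rw [PySem.List.pyRange_of_pos a b hs, PySem.List.pyRange_of_pos 0 (b - a) hs]
  rw [List.map_map, List.map_map]
  have e1 : b - a - 0 + s - 1 = b - a + s - 1 := by ring
  rw [e1, if_congr (by omega : a < b ↔ (0:Int) < b - a) rfl rfl]
  apply List.map_congr_left
  intro k _
  simp only [Function.comp]
  ring_nf

theorem pvRangePosCons {a b s : Int} (hs : 0 < s) (hab : a < b) :
    PySem.List.pyRange a b s = a :: PySem.List.pyRange (a + s) b s := by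
  rw [PySem.List.pyRange_of_pos a b hs, PySem.List.pyRange_of_pos (a + s) b hs]
  rw [if_pos hab]
  have hq : (b - a + s - 1) / s = (b - a - 1) / s + 1 := by
    have h1 : b - a + s - 1 = (b - a - 1) + 1 * s := by ring
    rw [h1, Int.add_mul_ediv_right _ _ (by omega : s ≠ 0)]
  by_cases h2 : a + s < b
  · rw [if_pos h2]
    have hge : 0 ≤ (b - a - 1) / s := Int.ediv_nonneg (by omega) (by omega)
    have hn : ((b - a + s - 1) / s).toNat = ((b - a - 1) / s).toNat + 1 := by
      rw [hq]; omega
    rw [hn, List.range_succ_eq_map, List.map_cons, List.map_map]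
    congr 1
    · simp
    · have h3 : b - (a + s) + s - 1 = b - a - 1 := by ring
      rw [h3]
      apply List.map_congr_left
      intro k _
      simp only [Function.comp]
      push_cast
      ring
  · rw [if_neg h2]
    have hz : (b - a - 1) / s = 0 := Int.ediv_eq_zero_of_lt (by omega) (by omega)
    have hn : ((b - a + s - 1) / s).toNat = 1 := by rw [hq, hz]; rfl
    rw [hn]
    simp

-- the step-s index loop over slices IS chunking
theorem pvMapRangeChunks {α β : Type} (s : Nat) (hs : 0 < s) (g : List α → β) :
    ∀ (n : Nat) (l : List α), l.length ≤ n →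
      (PySem.List.pyRange 0 (l.length : Int) s).map
          (fun i => g (PySem.List.slice l (some i) (some (i + s))))
        = (pvChunks s l).map g := by
  intro n
  induction n with
  | zero =>
    intro l hl
    have : l = [] := List.eq_nil_of_length_eq_zero (by omega)
    subst this
    simp [pvChunks_nil, PySem.List.pyRange_of_pos 0 0 (by exact_mod_cast hs : (0:Int) < s)]
  | succ n ih =>
    intro l hl
    cases l with
    | nil =>
      simp [pvChunks_nil, PySem.List.pyRange_of_pos 0 0 (by exact_mod_cast hs : (0:Int) < s)]
    | cons a t =>
      set l := a :: t with hldef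
      have hlen : (0 : Int) < (l.length : Int) := by simp [hldef]
      have hscast : (0 : Int) < (s : Int) := by exact_mod_cast hs
      rw [pvRangePosCons hscast hlen, List.map_cons]
      simp only [zero_add]
      rw [pvChunks_cons hs l (by simp [hldef]), List.map_cons]
      congr 1
      · -- head: slice l 0 s = take s l
        congr 1
        have : PySem.List.slice l (some (0:Int)) (some ((0:Int) + (s:Int))) = (l.drop 0).take s := by
          have := PySem.List.slice_natCast_add l 0 s
          simpa using this
        simpa using this
      · -- tail
        rw [pvRangeShift (s : Int) (l.length : Int) (s : Int) hscast]
        by_cases hcase : s < l.length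
        · have hdlen : ((l.drop s).length : Int) = (l.length : Int) - (s : Int) := by
            simp [List.length_drop]; omega
          rw [show ((l.length : Int) - (s : Int)) = ((l.drop s).length : Int) from hdlen.symm]
          have hmap : ((PySem.List.pyRange 0 ((l.drop s).length : Int) s).map
              (fun i => g (PySem.List.slice l (some ((s:Int) + i)) (some ((s:Int) + i + s)))))
              = ((PySem.List.pyRange 0 ((l.drop s).length : Int) s).map
              (fun i => g (PySem.List.slice (l.drop s) (some i) (some (i + s))))) := by
            apply List.map_congr_left
            intro i hi
            have hmem := (PySem.List.mem_pyRange_iff_of_pos hscast i).mp hi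
            obtain ⟨hi0, _, _⟩ := hmem
            congr 1
            obtain ⟨k, hk⟩ : ∃ k : Nat, i = (k : Int) := ⟨i.toNat, by omega⟩
            subst hk
            have h1 : ((s : Int) + (k : Int)) = (((s + k : Nat) : Int)) := by push_cast; ring
            rw [h1, PySem.List.slice_natCast_add l (s + k) s]
            have h3 : ((k : Int) + (s : Int)) = (((k : Nat) : Int) + ((s : Nat) : Int)) := by push_cast; ring
            rw [h3, PySem.List.slice_natCast_add (l.drop s) k s]
            rw [List.drop_drop]
          rw [hmap]
          apply ih
          simp [hldef] at hl ⊢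
          omega
        · -- l.length ≤ s : both tails are empty
          have h1 : PySem.List.pyRange 0 ((l.length : Int) - (s : Int)) s = [] := by
            rw [PySem.List.pyRange_of_pos 0 _ hscast, if_neg (by omega)]
            rfl
          have h2 : l.drop s = [] := by
            apply List.eq_nil_of_length_eq_zero
            simp [List.length_drop]
            omega
          rw [h1, h2, pvChunks_nil]
          rfl

theorem pvMapRangeChunksId {α : Type} (s : Nat) (hs : 0 < s) (l : List α) :
    (PySem.List.pyRange 0 (l.length : Int) s).map
        (fun i => PySem.List.slice l (some i) (some (i + s)))
      = pvChunks s l := by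
  have h := pvMapRangeChunks s hs (fun x => x) l.length l le_rfl
  simpa using h

-- A's value in chunk form
theorem pvA_chunks (data : List Char) :
    ((PySem.List.pyRange 0
        (((PySem.List.pyRange 0 (data.length : Int) 64).foldl (fun acc i =>
            acc ++ [String.ofList (pvLjust64 (PySem.List.slice data (some i) (some (i + 64))))]) []).length : Int) 8).foldl
      (fun acc i =>
        acc ++ [PySem.List.slice ((PySem.List.pyRange 0 (data.length : Int) 64).foldl (fun acc i =>
            acc ++ [String.ofList (pvLjust64 (PySem.List.slice data (some i) (some (i + 64))))]) [])
          (some i) (some (i + 8))]) [])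
    = pvChunks 8 ((pvChunks 64 data).map (fun w => String.ofList (pvLjust64 w))) := by
  simp only [pvFoldlAppendMap, List.nil_append]
  have h64 := pvMapRangeChunks 64 (by omega) (fun w => String.ofList (pvLjust64 w)) data.length data le_rfl
  simp only [Nat.cast_ofNat] at h64
  rw [h64]
  have h8 := pvMapRangeChunksId 8 (by omega)
      ((pvChunks 64 data).map (fun w => String.ofList (pvLjust64 w)))
  simp only [Nat.cast_ofNat] at h8
  rw [h8]

-- a full 64-bit word needs no padding
theorem pvLjust64_full (l : List Char) (h : l.length = 64) : pvLjust64 l = l := by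
  simp [pvLjust64, h]

-- feeding a word-completing run of bits flushes the word (and possibly the row)
theorem pvEmit_full : ∀ (w p : List Char) (m : List (List String)) (lin : List String),
    p.length + w.length = 64 → w ≠ [] →
    w.foldl pvEmit (m, lin, p) =
      if (lin ++ [String.ofList (p ++ w)]).length = 8 then (m ++ [lin ++ [String.ofList (p ++ w)]], [], [])
      else (m, lin ++ [String.ofList (p ++ w)], []) := by
  intro w
  induction w with
  | nil => intro p m lin _ hw; exact absurd rfl hw
  | cons b t ih =>
    intro p m lin h _
    cases t with
    | nil =>
      have hp : (p ++ [b]).length = 64 := by simp at h ⊢; omega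
      simp only [List.foldl_cons, List.foldl_nil, pvEmit, hp]
      simp
    | cons c t' =>
      have hp : (p ++ [b]).length ≠ 64 := by simp at h ⊢; omega
      have hstep : pvEmit (m, lin, p) b = (m, lin, p ++ [b]) := by
        simp [pvEmit, show p.length ≠ 63 by simp at h; omega]
      rw [List.foldl_cons, hstep]
      have := ih (p ++ [b]) m lin (by simp at h ⊢; omega) (by simp)
      simpa [List.append_assoc] using this

-- feeding too few bits just accumulates them
theorem pvEmit_partial : ∀ (w p : List Char) (m : List (List String)) (lin : List String),
    p.length + w.length < 64 →
    w.foldl pvEmit (m, lin, p) = (m, lin, p ++ w) := by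
  intro w
  induction w with
  | nil => intro p m lin _; simp
  | cons b t ih =>
    intro p m lin h
    have hp : (p ++ [b]).length ≠ 64 := by simp at h ⊢; omega
    simp only [List.foldl_cons, pvEmit, if_neg hp]
    have := ih (p ++ [b]) m lin (by simp at h ⊢; omega)
    simpa [List.append_assoc] using this

-- streaming invariant: finalized fold state = completed rows ++ chunked remaining words
theorem pvStream : ∀ (n : Nat) (data : List Char) (m : List (List String)) (lin : List String),
    data.length ≤ n → lin.length < 8 →
    pvFinalize (data.foldl pvEmit (m, lin, [])) =
      m ++ pvChunks 8 (lin ++ (pvChunks 64 data).map (fun c => String.ofList (pvLjust64 c))) := by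
  intro n
  induction n with
  | zero =>
    intro data m lin hlen hlin
    have hd : data = [] := List.eq_nil_of_length_eq_zero (by omega)
    subst hd
    simp only [List.foldl_nil, pvChunks_nil, List.map_nil, List.append_nil, pvFinalize]
    by_cases hl : lin = []
    · subst hl; simp [pvChunks_nil]
    · simp [hl, pvChunks_singleton (by omega : (0:Nat) < 8) lin hl (by omega), List.isEmpty_iff]
  | succ n ih =>
    intro data m lin hlen hlin
    by_cases hd : data = []
    · subst hd
      simp only [List.foldl_nil, pvChunks_nil, List.map_nil, List.append_nil, pvFinalize]
      by_cases hl : lin = []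
      · subst hl; simp [pvChunks_nil]
      · simp [hl, pvChunks_singleton (by omega : (0:Nat) < 8) lin hl (by omega), List.isEmpty_iff]
    by_cases h64 : 64 ≤ data.length
    · -- a full word at the front
      set w := data.take 64 with hw
      set r := data.drop 64 with hr
      have hwlen : w.length = 64 := by simp [hw]; omega
      have hsplit : data = w ++ r := (List.take_append_drop 64 data).symm
      have hrlen : r.length ≤ n := by simp [hr]; omega
      have hwne : w ≠ [] := by
        intro hc; rw [hc] at hwlen; simp at hwlen
      rw [hsplit, List.foldl_append]
      rw [pvEmit_full w [] m lin (by simpa using hwlen) hwne]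
      simp only [List.nil_append]
      have hchunks : pvChunks 64 (w ++ r) = w :: pvChunks 64 r :=
        pvChunks_append_full (by omega) w r hwlen
      rw [hchunks, List.map_cons, pvLjust64_full w hwlen]
      by_cases h8 : (lin ++ [String.ofList w]).length = 8
      · rw [if_pos h8]
        rw [ih r (m ++ [lin ++ [String.ofList w]]) [] hrlen (by simp)]
        rw [show lin ++ String.ofList w :: (pvChunks 64 r).map (fun c => String.ofList (pvLjust64 c))
              = (lin ++ [String.ofList w]) ++ (pvChunks 64 r).map (fun c => String.ofList (pvLjust64 c)) by simp]
        rw [pvChunks_append_full (by omega) _ _ h8]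
        simp
      · rw [if_neg h8]
        rw [ih r m (lin ++ [String.ofList w]) hrlen (by simp at h8 ⊢; omega)]
        simp
    · -- a final partial word
      rw [pvEmit_partial data [] m lin (by simpa using (by omega : data.length < 64))]
      simp only [List.nil_append]
      have hfin : pvFinalize (m, lin, data) = m ++ [lin ++ [String.ofList (pvLjust64 data)]] := by
        simp [pvFinalize, List.isEmpty_iff, hd]
      rw [hfin]
      rw [pvChunks_singleton (by omega : (0:Nat) < 64) data hd (by omega)]
      rw [List.map_cons, List.map_nil]
      rw [pvChunks_singleton (by omega : (0:Nat) < 8) _ (by simp) (by simp; omega)]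

-- nested per-character loops = one fold over the concatenated bit stream
theorem pvFoldNested (s : String) (st : List (List String) × List String × List Char) :
    s.toList.foldl (fun st c => (pvFmt8 c).foldl pvEmit st) st
      = (pvStringToBinary s).foldl pvEmit st := by
  rw [pvStringToBinary, List.foldl_flatten, List.foldl_map]

theorem pvMain (nome : String) (idade : Int) (sexo : String) :
    ((PySem.List.pyRange 0
        (((PySem.List.pyRange 0 ((pvStringToBinary nome ++ pvInt64 idade ++ pvStringToBinary sexo).length : Int) 64).foldl (fun acc i =>
            acc ++ [String.ofList (pvLjust64 (PySem.List.slice (pvStringToBinary nome ++ pvInt64 idade ++ pvStringToBinary sexo) (some i) (some (i + 64))))]) []).length : Int) 8).foldl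
      (fun acc i =>
        acc ++ [PySem.List.slice ((PySem.List.pyRange 0 ((pvStringToBinary nome ++ pvInt64 idade ++ pvStringToBinary sexo).length : Int) 64).foldl (fun acc i =>
            acc ++ [String.ofList (pvLjust64 (PySem.List.slice (pvStringToBinary nome ++ pvInt64 idade ++ pvStringToBinary sexo) (some i) (some (i + 64))))]) [])
          (some i) (some (i + 8))]) [])
    = pvFinalize (sexo.toList.foldl (fun st c => (pvFmt8 c).foldl pvEmit st)
        ((pvInt64 idade).foldl pvEmit
          (nome.toList.foldl (fun st c => (pvFmt8 c).foldl pvEmit st) ([], [], [])))) := by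
  rw [pvFoldNested, pvFoldNested, ← List.foldl_append, ← List.foldl_append]
  rw [pvA_chunks (pvStringToBinary nome ++ pvInt64 idade ++ pvStringToBinary sexo)]
  rw [pvStream (pvStringToBinary nome ++ (pvInt64 idade ++ pvStringToBinary sexo)).length
      (pvStringToBinary nome ++ (pvInt64 idade ++ pvStringToBinary sexo)) [] [] le_rfl (by simp)]
  simp [List.append_assoc]

-- ===== VERDICT (by name: the statement is the Claim_ definition above) =====
theorem gerar_memoria_spec : Claim_equal_gerar_memoria := by
  intro nome idade sexo endereco_inicial _
  unfold Spec_gerar_memoria gerar_memoria gerar_memoria_alt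
  exact pvMain nome idade sexo
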